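-- pv_equiv track=rewrite | github.com/eterevsky/tokens_old | filters.py | _encode_stream
-- ===== SOURCE A (Python) =====
-- from typing import Iterable
--
-- CHR_CAPITALIZE = "\u0014"
--
-- CHR_ALL_CAPS = "\u0015"
--
-- def _encode_stream(chunk: str) -> Iterable[str]:
--     word = []
--     in_word = False
--
--     for char in chunk:
--         if char.isalpha():
--             word.append(char)
--             in_word = True
--         else:
--             if in_word:
--                 merged = "".join(word)
--                 if merged[0].isupper() and merged[1:].islower():
--                     yield CHR_CAPITALIZE
--                     for c in word:
--                         yield c.lower()
--                 elif merged.isupper():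
--                     yield CHR_ALL_CAPS
--                     for c in word:
--                         yield c.lower()
--                 else:
--                     for c in word:
--                         yield c
--                 in_word = False
--                 word.clear()
--             yield char
--
--     if in_word:
--         merged = "".join(word)
--         if merged[0].isupper() and merged[1:].islower():
--             yield CHR_CAPITALIZE
--             for c in word:
--                 yield c.lower()
--         elif merged.isupper():
--             yield CHR_ALL_CAPS
--             for c in word:
--                 yield c.lower()
--         else:
--             for c in word:
--                 yield c
--         in_word = False
--         word.clear()
-- ===== SOURCE B (Python) =====
-- CHR_CAPITALIZE = "\u0014"
--
-- CHR_ALL_CAPS = "\u0015"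
--
-- # B: incremental DFA — classifies each word by state transitions while scanning,
-- # emitting eagerly once the echo outcome is decided, instead of buffering a whole
-- # word and classifying it at flush time.
-- OUT, ECHO, UP, CAP = range(4)
--
-- def _encode_stream(chunk):
--     state = OUT
--     buf = []
--     for c in chunk:
--         if not c.isalpha():
--             if state == UP:
--                 yield CHR_ALL_CAPS
--                 for x in buf:
--                     yield x.lower()
--             elif state == CAP:
--                 yield CHR_CAPITALIZE
--                 for x in buf:
--                     yield x.lower()
--             buf = []
--             state = OUT
--             yield c
--         elif state == OUT:
--             if c.isupper():
--                 state = UP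
--                 buf = [c]
--             else:
--                 state = ECHO
--                 yield c
--         elif state == ECHO:
--             yield c
--         elif state == UP:
--             if c.isupper():
--                 buf.append(c)
--             elif len(buf) == 1:
--                 buf.append(c)
--                 state = CAP
--             else:
--                 yield from buf
--                 yield c
--                 buf = []
--                 state = ECHO
--         else:  # CAP: one upper then lowers so far
--             if c.isupper():
--                 yield from buf
--                 yield c
--                 buf = []
--                 state = ECHO
--             else:
--                 buf.append(c)
--     if state == UP:
--         yield CHR_ALL_CAPS
--         for x in buf:
--             yield x.lower()
--     elif state == CAP:
--         yield CHR_CAPITALIZE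
--         for x in buf:
--             yield x.lower()
-- ===== Notes on version B (the rewrite author's own statement) =====
-- stated objective: alternative
-- what changed: Replaced A's buffer-whole-word-then-classify scan (with its twice-duplicated flush block) by an incremental four-state DFA that classifies each word by per-character state transitions, emitting characters eagerly as soon as the echo outcome is decided instead of always buffering to the word's end.
import Mathlib
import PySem

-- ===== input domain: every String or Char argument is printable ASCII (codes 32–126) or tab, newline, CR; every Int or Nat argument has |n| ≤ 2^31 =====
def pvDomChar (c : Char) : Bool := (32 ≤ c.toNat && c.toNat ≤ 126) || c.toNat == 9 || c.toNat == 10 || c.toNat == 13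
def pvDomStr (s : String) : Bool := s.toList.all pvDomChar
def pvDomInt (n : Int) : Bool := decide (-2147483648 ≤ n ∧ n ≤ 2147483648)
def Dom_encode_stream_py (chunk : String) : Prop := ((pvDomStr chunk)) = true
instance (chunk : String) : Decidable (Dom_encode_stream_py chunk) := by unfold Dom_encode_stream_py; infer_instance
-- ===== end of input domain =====

-- B replaces A's buffer-whole-word-then-classify scan by an incremental DFA that
-- classifies each word by state transitions while scanning and emits eagerly once
-- the echo outcome is decided; objective: alternative (same O(n) cost).

-- Python str.islower() on a string of ASCII characters: at least one cased (lowercase)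
-- char and no uppercase char.  Exact on the ASCII domain (hand-ported; PySem has only the char forms).
def pyStrIslower (cs : List Char) : Bool :=
  cs.any PySem.Chars.islower && cs.all (fun c => !PySem.Chars.isupper c)

-- Python str.isupper() on a string of ASCII characters (exact on the ASCII domain).
def pyStrIsupper (cs : List Char) : Bool :=
  cs.any PySem.Chars.isupper && cs.all (fun c => !PySem.Chars.islower c)

-- ===== PORT A =====
-- the flush block (A repeats this code verbatim twice; both sites call this helper).
-- merged[0] is guarded by in_word = word ≠ [] at both call sites; head?.elim is exact there.
def encAflush (word : List Char) : List String :=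
  if ((word.head?).elim false PySem.Chars.isupper) && pyStrIslower (word.drop 1) then
    ["\u0014"] ++ word.map (fun c => String.singleton (PySem.Chars.lowerChar c))
  else if pyStrIsupper word then
    ["\u0015"] ++ word.map (fun c => String.singleton (PySem.Chars.lowerChar c))
  else
    word.map String.singleton

def encALoop : List Char → List Char → Bool → List String
  | [], word, in_word => if in_word then encAflush word else []
  | c :: rest, word, in_word =>
    if PySem.Chars.isalpha c then
      encALoop rest (word ++ [c]) true
    else
      (if in_word then encAflush word else []) ++ [String.singleton c] ++ encALoop rest [] false

def encode_stream_py (chunk : String) : List String :=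
  encALoop chunk.toList [] false

-- ===== PORT B =====
-- B's DFA state: outside a word / echoing a decided word / all-uppers-so-far (with
-- the buffered chars) / one upper then lowers so far (with the buffered chars).
inductive EncSt where
  | out : EncSt
  | echo : EncSt
  | up : List Char → EncSt
  | cap : List Char → EncSt
deriving DecidableEq, Repr

-- the word-end emission block of Source B (written twice there: non-alpha branch and end of loop)
def encBFlush : EncSt → List String
  | .up buf => ["\u0015"] ++ buf.map (fun c => String.singleton (PySem.Chars.lowerChar c))
  | .cap buf => ["\u0014"] ++ buf.map (fun c => String.singleton (PySem.Chars.lowerChar c))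
  | _ => []

-- Source B's per-character state-transition loop
def encBLoop : List Char → EncSt → List String
  | [], st => encBFlush st
  | c :: rest, st =>
    if !PySem.Chars.isalpha c then
      encBFlush st ++ (String.singleton c :: encBLoop rest .out)
    else
      match st with
      | .out =>
        if PySem.Chars.isupper c then encBLoop rest (.up [c])
        else String.singleton c :: encBLoop rest .echo
      | .echo => String.singleton c :: encBLoop rest .echo
      | .up buf =>
        if PySem.Chars.isupper c then encBLoop rest (.up (buf ++ [c]))
        else if buf.length == 1 then encBLoop rest (.cap (buf ++ [c]))
        else (buf.map String.singleton ++ [String.singleton c]) ++ encBLoop rest .echo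
      | .cap buf =>
        if PySem.Chars.isupper c then (buf.map String.singleton ++ [String.singleton c]) ++ encBLoop rest .echo
        else encBLoop rest (.cap (buf ++ [c]))

def encode_stream_py_alt (chunk : String) : List String :=
  encBLoop chunk.toList .out

-- ===== PRECONDITION & SPEC =====
def Spec_encode_stream_py (chunk : String) (out : List String) : Prop := out = encode_stream_py_alt chunk
instance (chunk : String) (out : List String) : Decidable (Spec_encode_stream_py chunk out) := by unfold Spec_encode_stream_py; infer_instance

-- ===== CLAIM =====
def Claim_equal_encode_stream_py : Prop := ∀ (chunk : String), Dom_encode_stream_py chunk → Spec_encode_stream_py chunk (encode_stream_py chunk)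

-- ===== LEMMAS AND PROOFS =====

-- word shapes (proof-only abstraction of A's buffered word / B's state)
def shapeUp (w : List Char) : Bool := w.all PySem.Chars.isupper
def shapeCap (w : List Char) : Bool :=
  match w with
  | [] => false
  | u :: rest => PySem.Chars.isupper u && !rest.isEmpty && rest.all PySem.Chars.islower

lemma upper_not_lower (c : Char) (h : PySem.Chars.isupper c = true) :
    PySem.Chars.islower c = false := by
  simp only [PySem.Chars.isupper, PySem.Chars.islower, Bool.and_eq_true, decide_eq_true_eq,
    Bool.and_eq_false_iff, decide_eq_false_iff_not, Char.le_def, UInt32.le_iff_toNat_le] at *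
  have e1 : 'A'.val.toNat = 65 := rfl
  have e2 : 'Z'.val.toNat = 90 := rfl
  have e3 : 'a'.val.toNat = 97 := rfl
  omega

lemma lower_not_upper (c : Char) (h : PySem.Chars.islower c = true) :
    PySem.Chars.isupper c = false := by
  simp only [PySem.Chars.isupper, PySem.Chars.islower, Bool.and_eq_true, decide_eq_true_eq,
    Bool.and_eq_false_iff, decide_eq_false_iff_not, Char.le_def, UInt32.le_iff_toNat_le] at *
  have e1 : 'A'.val.toNat = 65 := rfl
  have e2 : 'Z'.val.toNat = 90 := rfl
  have e3 : 'a'.val.toNat = 97 := rfl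
  omega

lemma alpha_cases (c : Char) (h : PySem.Chars.isalpha c = true) :
    PySem.Chars.isupper c = true ∨ PySem.Chars.islower c = true := by
  simpa [PySem.Chars.isalpha] using h

-- the three classification equations for A's flush on a nonempty all-alphabetic word
lemma flush_up (w : List Char) (hne : w ≠ []) (hup : shapeUp w = true) :
    encAflush w = encBFlush (.up w) := by
  match w, hne with
  | u :: rest, _ =>
    have hu : PySem.Chars.isupper u = true ∧ ∀ x ∈ rest, PySem.Chars.isupper x = true := by
      simpa [shapeUp] using hup
    have h1 : pyStrIslower rest = false := by
      simp only [pyStrIslower, Bool.and_eq_false_iff, List.any_eq_false]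
      exact Or.inl (fun x hx => by simp [upper_not_lower x (hu.2 x hx)])
    have h2 : pyStrIsupper (u :: rest) = true := by
      simp only [pyStrIsupper, Bool.and_eq_true, List.any_eq_true, List.all_eq_true]
      refine ⟨⟨u, by simp, hu.1⟩, fun x hx => ?_⟩
      rcases List.mem_cons.mp hx with h | h
      · subst h; simp [upper_not_lower x hu.1]
      · simp [upper_not_lower x (hu.2 x h)]
    simp [encAflush, encBFlush, h1, h2]

lemma flush_cap (w : List Char) (hcap : shapeCap w = true) :
    encAflush w = encBFlush (.cap w) := by
  match w with
  | [] => simp [shapeCap] at hcap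
  | u :: rest =>
    have h : (PySem.Chars.isupper u = true ∧ rest ≠ []) ∧ ∀ x ∈ rest, PySem.Chars.islower x = true := by
      simpa [shapeCap, List.isEmpty_iff] using hcap
    obtain ⟨⟨hu, hne⟩, hlow⟩ := h
    have h1 : pyStrIslower rest = true := by
      simp only [pyStrIslower, Bool.and_eq_true, List.any_eq_true, List.all_eq_true]
      refine ⟨?_, fun x hx => by simp [lower_not_upper x (hlow x hx)]⟩
      match rest, hne with
      | d :: ds, _ => exact ⟨d, by simp, hlow d (by simp)⟩
    simp [encAflush, encBFlush, h1, hu]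

lemma flush_echo (w : List Char) (hne : w ≠ [])
    (halpha : ∀ c ∈ w, PySem.Chars.isalpha c = true)
    (hup : shapeUp w = false) (hcap : shapeCap w = false) :
    encAflush w = w.map String.singleton := by
  match w, hne with
  | u :: rest, _ =>
    have hcapb : (PySem.Chars.isupper u && pyStrIslower rest) = false := by
      by_cases hu : PySem.Chars.isupper u = true
      · rw [hu, Bool.true_and]
        by_cases hr : pyStrIslower rest = true
        · exfalso
          simp only [pyStrIslower, Bool.and_eq_true, List.any_eq_true, List.all_eq_true] at hr
          obtain ⟨⟨x, hx, _⟩, hall⟩ := hr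
          have : shapeCap (u :: rest) = true := by
            simp only [shapeCap, hu, Bool.true_and, Bool.and_eq_true, Bool.not_eq_eq_eq_not,
              Bool.not_true, List.isEmpty_eq_false_iff, List.all_eq_true]
            refine ⟨by rintro rfl; simp at hx, fun y hy => ?_⟩
            rcases alpha_cases y (halpha y (by simp [hy])) with h | h
            · exact absurd h (by simpa using hall y hy)
            · exact h
          rw [this] at hcap; exact absurd hcap (by simp)
        · simpa using hr
      · simp [Bool.eq_false_iff.mpr hu]
    have hupb : pyStrIsupper (u :: rest) = false := by
      by_cases h : pyStrIsupper (u :: rest) = true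
      · exfalso
        simp only [pyStrIsupper, Bool.and_eq_true, List.any_eq_true, List.all_eq_true] at h
        have : shapeUp (u :: rest) = true := by
          simp only [shapeUp, List.all_eq_true]
          intro y hy
          rcases alpha_cases y (halpha y hy) with hh | hh
          · exact hh
          · have := h.2 y hy; simp [hh] at this
        rw [this] at hup; exact absurd hup (by simp)
      · simpa using h
    unfold encAflush
    simp only [List.head?_cons, Option.elim, List.drop_succ_cons, List.drop_zero]
    simp [hcapb, hupb]

-- the invariant tying A's (word, in_word) scan to B's DFA, proved together with the
-- out-of-word equation by induction on the remaining input's length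
lemma main_eq : ∀ n : Nat, ∀ cs : List Char, cs.length ≤ n →
    (encALoop cs [] false = encBLoop cs .out) ∧
    (∀ w, w ≠ [] → (∀ c ∈ w, PySem.Chars.isalpha c = true) →
      encALoop cs w true =
        (if shapeUp w then encBLoop cs (.up w)
         else if shapeCap w then encBLoop cs (.cap w)
         else w.map String.singleton ++ encBLoop cs .echo)) := by
  intro n
  induction n with
  | zero =>
    intro cs h
    have hnil : cs = [] := List.eq_nil_of_length_eq_zero (Nat.le_zero.mp h)
    subst hnil
    refine ⟨by simp [encALoop, encBLoop, encBFlush], ?_⟩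
    intro w hne halpha
    have hA : encALoop [] w true = encAflush w := by simp [encALoop]
    rw [hA]
    split_ifs with h1 h2
    · exact flush_up w hne h1
    · exact flush_cap w h2
    · rw [flush_echo w hne halpha (by simpa using h1) (by simpa using h2)]
      simp [encBLoop, encBFlush]
  | succ n ih =>
    intro cs hlen
    match cs with
    | [] =>
      refine ⟨by simp [encALoop, encBLoop, encBFlush], ?_⟩
      intro w hne halpha
      have hA : encALoop [] w true = encAflush w := by simp [encALoop]
      rw [hA]
      split_ifs with h1 h2
      · exact flush_up w hne h1
      · exact flush_cap w h2
      · rw [flush_echo w hne halpha (by simpa using h1) (by simpa using h2)]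
        simp [encBLoop, encBFlush]
    | c :: rest =>
      have hrestlen : rest.length ≤ n := by simp at hlen; omega
      have IH := ih rest hrestlen
      constructor
      · -- out of word
        by_cases ha : PySem.Chars.isalpha c = true
        · have hA : encALoop (c :: rest) [] false = encALoop rest [c] true := by
            simp [encALoop, ha]
          rw [hA, IH.2 [c] (by simp) (by simpa using ha)]
          rcases alpha_cases c ha with hu | hl
          · simp [encBLoop, ha, hu, shapeUp]
          · have hnu := lower_not_upper c hl
            simp [encBLoop, ha, hnu, shapeUp, shapeCap]
        · have hA : encALoop (c :: rest) [] false =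
              [] ++ [String.singleton c] ++ encALoop rest [] false := by
            simp [encALoop, ha]
          rw [hA, IH.1]
          simp [encBLoop, ha, encBFlush]
      · -- in word
        intro w hne halpha
        by_cases ha : PySem.Chars.isalpha c = true
        · have hA : encALoop (c :: rest) w true = encALoop rest (w ++ [c]) true := by
            simp [encALoop, ha]
          have halpha' : ∀ x ∈ w ++ [c], PySem.Chars.isalpha x = true := by
            intro x hx
            rcases List.mem_append.mp hx with h | h
            · exact halpha x h
            · simp at h; subst h; exact ha
          rw [hA, IH.2 (w ++ [c]) (by simp) halpha']
          match w, hne with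
          | u :: ws, _ =>
          simp only [List.cons_append]
          rcases alpha_cases c ha with hcu | hcl
          · -- c upper
            have hcnl := upper_not_lower c hcu
            have hcapF : shapeCap (u :: (ws ++ [c])) = false := by
              simp only [shapeCap, Bool.and_eq_false_iff]
              right
              simp only [List.all_eq_false]
              exact ⟨c, by simp, by simp [hcnl]⟩
            by_cases hup : shapeUp (u :: ws) = true
            · have hup' : shapeUp (u :: (ws ++ [c])) = true := by
                simp only [shapeUp, List.all_eq_true] at *
                intro x hx
                rcases List.mem_cons.mp hx with h | h
                · subst h; exact hup x (by simp)
                · rcases List.mem_append.mp h with h' | h'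
                  · exact hup x (by simp [h'])
                  · simp at h'; subst h'; exact hcu
              simp [encBLoop, ha, hcu, hup, hup']
            · have hupN : shapeUp (u :: ws) = false := by simpa using hup
              have hupF : shapeUp (u :: (ws ++ [c])) = false := by
                by_cases h : shapeUp (u :: (ws ++ [c])) = true
                · exfalso
                  have : shapeUp (u :: ws) = true := by
                    simp only [shapeUp, List.all_eq_true] at h ⊢
                    intro x hx
                    rcases List.mem_cons.mp hx with h' | h'
                    · subst h'; exact h x (by simp)
                    · exact h x (by simp [h'])
                  exact hup this
                · simpa using h
              by_cases hcap : shapeCap (u :: ws) = true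
              · -- cap state, upper char: mixed → echo, emit buffer + c
                simp [encBLoop, ha, hcu, hupN, hupF, hcapF, hcap]
              · -- echo state
                have hcapN : shapeCap (u :: ws) = false := by simpa using hcap
                simp [encBLoop, ha, hupN, hupF, hcapF, hcapN]
          · -- c lower
            have hcnu := lower_not_upper c hcl
            have hupF : shapeUp (u :: (ws ++ [c])) = false := by
              simp only [shapeUp, List.all_eq_false]
              exact ⟨c, by simp, by simp [hcnu]⟩
            by_cases hup : shapeUp (u :: ws) = true
            · by_cases hlen1 : ws = []
              · subst hlen1
                have hu : PySem.Chars.isupper u = true := by simpa [shapeUp] using hup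
                have hcap' : shapeCap (u :: [c]) = true := by
                  simp [shapeCap, hu, hcl]
                have hupF2 : shapeUp [u, c] = false := by simpa using hupF
                simp [encBLoop, ha, hcnu, hup, hupF2, hcap']
              · match ws, hlen1 with
                | d :: ds, _ =>
                have hd : PySem.Chars.isupper d = true := by
                  simp only [shapeUp, List.all_eq_true] at hup
                  exact hup d (by simp)
                have hcapF : shapeCap (u :: d :: (ds ++ [c])) = false := by
                  simp only [shapeCap, Bool.and_eq_false_iff]
                  right
                  simp only [List.all_eq_false]
                  exact ⟨d, by simp, by simp [upper_not_lower d hd]⟩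
                have hupF2 : shapeUp (u :: d :: (ds ++ [c])) = false := by simpa using hupF
                simp [encBLoop, ha, hcnu, hup, hupF2, hcapF]
            · have hupN : shapeUp (u :: ws) = false := by simpa using hup
              by_cases hcap : shapeCap (u :: ws) = true
              · -- cap state, lower char: stay cap
                have hcap' : shapeCap (u :: (ws ++ [c])) = true := by
                  simp only [shapeCap, Bool.and_eq_true, Bool.not_eq_eq_eq_not,
                    Bool.not_true, List.isEmpty_eq_false_iff, List.all_eq_true] at *
                  refine ⟨⟨hcap.1.1, by simp⟩, fun y hy => ?_⟩
                  rcases List.mem_append.mp hy with h | h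
                  · exact hcap.2 y h
                  · simp at h; subst h; exact hcl
                simp [encBLoop, ha, hcnu, hupN, hupF, hcap, hcap']
              · -- echo state stays echo
                have hcapN : shapeCap (u :: ws) = false := by simpa using hcap
                have hcapF : shapeCap (u :: (ws ++ [c])) = false := by
                  by_cases hu : PySem.Chars.isupper u = true
                  · -- not shapeUp and not shapeCap with u upper ⇒ ws contains an upper
                    have hwsne : ws ≠ [] := by
                      rintro rfl
                      simp [shapeUp, hu] at hup
                    have hex : ∃ x ∈ ws, PySem.Chars.isupper x = true := by
                      by_contra hc
                      push Not at hc
                      have : shapeCap (u :: ws) = true := by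
                        simp only [shapeCap, hu, Bool.true_and, Bool.and_eq_true,
                          Bool.not_eq_eq_eq_not, Bool.not_true, List.isEmpty_eq_false_iff,
                          List.all_eq_true]
                        refine ⟨hwsne, fun y hy => ?_⟩
                        rcases alpha_cases y (halpha y (by simp [hy])) with h | h
                        · exact absurd h (by simpa using hc y hy)
                        · exact h
                      exact absurd this (by simp [hcapN])
                    obtain ⟨x, hx, hxu⟩ := hex
                    simp only [shapeCap, Bool.and_eq_false_iff]
                    right
                    simp only [List.all_eq_false]
                    exact ⟨x, by simp [hx], by simp [upper_not_lower x hxu]⟩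
                  · simp only [shapeCap, Bool.and_eq_false_iff]
                    left; left
                    simpa using hu
                simp [encBLoop, ha, hupN, hupF, hcapN, hcapF]
        · -- non-alpha char: flush and separator
          have hA : encALoop (c :: rest) w true =
              encAflush w ++ [String.singleton c] ++ encALoop rest [] false := by
            simp [encALoop, ha]
          rw [hA, IH.1]
          split_ifs with h1 h2
          · simp [encBLoop, ha, flush_up w hne h1]
          · simp [encBLoop, ha, flush_cap w h2]
          · simp [encBLoop, ha, encBFlush,
              flush_echo w hne halpha (by simpa using h1) (by simpa using h2)]

-- ===== VERDICT =====
theorem encode_stream_py_spec : Claim_equal_encode_stream_py := by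
  intro chunk _
  unfold Spec_encode_stream_py encode_stream_py encode_stream_py_alt
  exact (main_eq chunk.toList.length chunk.toList le_rfl).1
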